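-- pv_equiv track=rewrite | github.com/Eugene-SN/pdf-converter | airflow/dags/content_transformation.py | normalize_table_matrix
-- ===== SOURCE A (Python) =====
-- from typing import Dict, Any, List, Optional, Tuple
--
-- def sanitize_table_cell(value: Any) -> str:
--     if value is None:
--         return ''
--     text = str(value).strip()
--     if not text:
--         return ''
--     text = text.replace('\r\n', '\n').replace('\r', '\n')
--     if '\n' in text:
--         text = '<br>'.join(part.strip() for part in text.split('\n') if part.strip())
--     return text
--
-- def trim_trailing_empty_columns(matrix: List[List[str]]) -> List[List[str]]:
--     if not matrix:
--         return []
--     col_count = len(matrix[0])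
--     last_nonempty = -1
--     for col in range(col_count):
--         if any((row[col] if col < len(row) else '').strip() for row in matrix):
--             last_nonempty = col
--     if last_nonempty == -1:
--         return []
--     trimmed: List[List[str]] = []
--     for row in matrix:
--         padded_row = list(row[:last_nonempty + 1])
--         if len(padded_row) < last_nonempty + 1:
--             padded_row.extend([''] * (last_nonempty + 1 - len(padded_row)))
--         trimmed.append(padded_row)
--     return trimmed
--
-- def normalize_table_matrix(matrix: List[List[Any]]) -> List[List[str]]:
--     if not matrix:
--         return []
--     sanitized: List[List[str]] = []
--     max_cols = 0
--     for row in matrix: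
--         sanitized_row = [sanitize_table_cell(cell) for cell in row]
--         sanitized.append(sanitized_row)
--         max_cols = max(max_cols, len(sanitized_row))
--     if max_cols == 0:
--         return []
--     for row in sanitized:
--         if len(row) < max_cols:
--             row.extend([''] * (max_cols - len(row)))
--     sanitized = trim_trailing_empty_columns(sanitized)
--     while sanitized and all(not cell.strip() for cell in sanitized[-1]):
--         sanitized.pop()
--     if not sanitized:
--         return []
--     if all(not cell.strip() for cell in sanitized[0]) and any(
--         any(cell.strip() for cell in row) for row in sanitized[1:]
--     ):
--         for idx in range(1, len(sanitized)):
--             if any(cell.strip() for cell in sanitized[idx]):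
--                 sanitized[0], sanitized[idx] = sanitized[idx], sanitized[0]
--                 break
--     return sanitized
-- ===== SOURCE B (Python) =====
-- from typing import Any, List
--
--
-- def sanitize_table_cell(value: Any) -> str:
--     if value is None:
--         return ''
--     text = str(value).strip()
--     if not text:
--         return ''
--     text = text.replace('\r\n', '\n').replace('\r', '\n')
--     if '\n' in text:
--         text = '<br>'.join(part.strip() for part in text.split('\n') if part.strip())
--     return text
--
--
-- def _last_index(items, pred) -> int:
--     """Index of the last item satisfying pred, -1 if none."""
--     k = -1
--     for i, x in enumerate(items):
--         if pred(x):
--             k = i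
--     return k
--
--
-- def normalize_table_matrix(matrix: List[List[Any]]) -> List[List[str]]:
--     sanitized = [[sanitize_table_cell(cell) for cell in row] for row in matrix]
--     # target width = 1 + maximal index of a non-empty cell across all rows
--     width = 0
--     for row in sanitized:
--         width = max(width, 1 + _last_index(row, lambda c: c.strip()))
--     if width == 0:
--         return []
--     out = [(row + [''] * width)[:width] for row in sanitized]
--     # cut at the last row containing a non-empty cell
--     last_row = _last_index(out, lambda row: any(c.strip() for c in row))
--     out = out[:last_row + 1]
--     # identical empty-header-swap step
--     if all(not c.strip() for c in out[0]) and any(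
--         any(c.strip() for c in row) for row in out[1:]
--     ):
--         for i in range(1, len(out)):
--             if any(c.strip() for c in out[i]):
--                 out[0], out[i] = out[i], out[0]
--                 break
--     return out
-- ===== Notes on version B (the rewrite author's own statement) =====
-- stated objective: simpler
-- what changed: B replaces A's pad-every-row-to-max_cols pass, column-major trailing-column trim helper and while-pop of trailing empty rows by one row-major scan: target width = 1 + the maximal last non-empty-cell index over all rows, each row sliced/padded to that width directly, and the table cut at the last non-empty row; the empty-header-swap step is kept identical.
import Mathlib
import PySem

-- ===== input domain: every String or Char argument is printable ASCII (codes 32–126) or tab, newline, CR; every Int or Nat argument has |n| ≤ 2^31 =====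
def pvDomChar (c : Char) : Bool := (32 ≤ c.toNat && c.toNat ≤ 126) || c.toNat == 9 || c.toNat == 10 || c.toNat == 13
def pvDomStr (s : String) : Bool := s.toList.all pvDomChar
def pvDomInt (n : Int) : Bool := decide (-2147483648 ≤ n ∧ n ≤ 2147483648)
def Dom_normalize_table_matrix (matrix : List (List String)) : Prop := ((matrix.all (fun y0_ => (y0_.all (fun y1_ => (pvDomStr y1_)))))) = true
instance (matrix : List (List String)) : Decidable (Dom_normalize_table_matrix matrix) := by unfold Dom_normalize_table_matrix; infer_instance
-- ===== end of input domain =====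

-- B computes the target width and the last non-empty row in single row-major scans instead of
-- A's pad-to-max_cols pass, column-major trailing-column trim and while-pop loop (objective: simpler).


-- ===== PORT A =====
-- cells are strings here, so `str(value)` is the identity and the `value is None` branch never fires
def sanitize_table_cell (value : String) : String :=
  let text := PySem.Str.strip value
  if text = "" then ""
  else
    let text := PySem.Str.replace (PySem.Str.replace text "\r\n" "\n") "\r" "\n"
    if PySem.Str.isIn "\n" text then
      -- text.split('\n'): the separator "\n" is non-empty, so split? always returns some
      PySem.Str.join "<br>" ((((PySem.Str.split? text "\n").getD []).filter
        (fun part => PySem.Str.strip part ≠ "")).map PySem.Str.strip)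
    else text

-- truthiness of `cell.strip()` (both Pythons test cells this way)
def cellNe (c : String) : Bool := PySem.Str.strip c != ""

def trim_trailing_empty_columns (matrix : List (List String)) : List (List String) :=
  if matrix = [] then []
  else
    let col_count := (matrix.getD 0 []).length
    -- `for col in range(col_count)`: col runs over the naturals 0 … col_count-1
    let last_nonempty : Int := (List.range col_count).foldl (fun acc col =>
      if matrix.any (fun row => cellNe (if col < row.length then row.getD col "" else "")) then (col : Int) else acc) (-1)
    if last_nonempty = -1 then []
    else matrix.map (fun row =>
      let padded_row := PySem.List.slice row none (some (last_nonempty + 1))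
      if (padded_row.length : Int) < last_nonempty + 1 then
        padded_row ++ List.replicate (last_nonempty + 1 - padded_row.length).toNat ""
      else padded_row)

-- `while sanitized and all(not cell.strip() for cell in sanitized[-1]): sanitized.pop()`
def popTrailing (l : List (List String)) : List (List String) :=
  if h : l ≠ [] ∧ (l.getLast?.getD []).all (fun c => !cellNe c) then popTrailing l.dropLast else l
termination_by l.length
decreasing_by
  have : 0 < l.length := List.length_pos_of_ne_nil h.1
  simp only [List.length_dropLast]; omega

-- the empty-header swap: `for idx in range(1, len(l)): if any(...): swap; break`
def headerSwapLoop (l : List (List String)) (idx : Nat) : List (List String) :=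
  if h : idx < l.length then
    if (l.getD idx []).any cellNe then (l.set 0 (l.getD idx [])).set idx (l.getD 0 [])
    else headerSwapLoop l (idx + 1)
  else l
termination_by l.length - idx

def headerSwap (l : List (List String)) : List (List String) :=
  if ((l.getD 0 []).all fun c => !cellNe c) &&
     ((PySem.List.slice l (some 1) none).any fun row => row.any cellNe) then
    headerSwapLoop l 1
  else l

def normalize_table_matrix (matrix : List (List String)) : List (List String) :=
  if matrix = [] then []
  else
    let sm := matrix.foldl (fun (acc : List (List String) × Int) row =>
      let sanitized_row := row.map sanitize_table_cell
      (acc.1 ++ [sanitized_row], max acc.2 (sanitized_row.length : Int))) ([], 0)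
    let sanitized := sm.1
    let max_cols := sm.2
    if max_cols = 0 then []
    else
      let sanitized := sanitized.map (fun row =>
        if (row.length : Int) < max_cols then row ++ List.replicate (max_cols - row.length).toNat "" else row)
      let sanitized := trim_trailing_empty_columns sanitized
      let sanitized := popTrailing sanitized
      if sanitized = [] then []
      else headerSwap sanitized

-- ===== PORT B =====
-- `_last_index(items, pred)` of Source B
def lastMatch {α : Type} (p : α → Bool) (xs : List α) : Int :=
  (PySem.List.enumerate xs).foldl (fun k ic => if p ic.2 then ic.1 else k) (-1)

def normalize_table_matrix_alt (matrix : List (List String)) : List (List String) :=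
  let sanitized := matrix.map (fun row => row.map sanitize_table_cell)
  let width := sanitized.foldl (fun w row => max w (1 + lastMatch cellNe row)) 0
  if width = 0 then []
  else
    let out := sanitized.map (fun row =>
      PySem.List.slice (row ++ List.replicate width.toNat "") none (some width))
    let last_row := lastMatch (fun row => row.any cellNe) out
    let out := PySem.List.slice out none (some (last_row + 1))
    headerSwap out

-- ===== PRECONDITION & SPEC =====
def Spec_normalize_table_matrix (matrix : List (List String)) (out : List (List String)) : Prop := out = normalize_table_matrix_alt matrix
instance (matrix : List (List String)) (out : List (List String)) : Decidable (Spec_normalize_table_matrix matrix out) := by unfold Spec_normalize_table_matrix; infer_instance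

-- ===== CLAIM (what is proved, stated in full; the proofs are below) =====
def Claim_equal_normalize_table_matrix : Prop := ∀ (matrix : List (List String)), Dom_normalize_table_matrix matrix → Spec_normalize_table_matrix matrix (normalize_table_matrix matrix)

-- ===== LEMMAS AND PROOFS =====

def rowNe (row : List String) : Bool := row.any cellNe

-- last index below n at which q holds, -1 if none (the value A's column loop computes)
def AL (q : Nat → Bool) (n : Nat) : Int :=
  (List.range n).foldl (fun acc col => if q col then (col : Int) else acc) (-1)

-- "some sanitized row has a non-empty cell at column i"
def QB (rs : List (List String)) (i : Nat) : Bool :=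
  rs.any (fun r => decide (i < r.length) && cellNe (r.getD i ""))

-- characterisation of a "last index below n satisfying p" value
def LastSpec (p : Nat → Bool) (n : Nat) (v : Int) : Prop :=
  (-1 ≤ v ∧ v < (n : Int)) ∧ (∀ i : Nat, i < n → p i = true → (i : Int) ≤ v) ∧
    (v = -1 ∨ (0 ≤ v ∧ p v.toNat = true))

def padTo (W : Int) (r : List String) : List String :=
  if (r.length : Int) < W then r ++ List.replicate (W - r.length).toNat "" else r

-- the column predicate A's trim loop tests on the padded matrix
def qCol (s : List (List String)) (Wi : Int) : Nat → Bool :=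
  fun col => (s.map (padTo Wi)).any fun row => cellNe (if col < row.length then row.getD col "" else "")

theorem cellNe_empty : cellNe "" = false := by decide

theorem AL_succ (q : Nat → Bool) (n : Nat) :
    AL q (n + 1) = if q n then (n : Int) else AL q n := by
  simp [AL, List.range_succ]

theorem specA (q : Nat → Bool) (n : Nat) : LastSpec q n (AL q n) := by
  induction n with
  | zero =>
    have h0 : AL q 0 = -1 := by simp [AL]
    rw [h0]
    refine ⟨⟨le_refl _, by norm_num⟩, ?_, Or.inl rfl⟩
    intro i hi; omega
  | succ n ih =>
    rw [AL_succ]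
    rcases ih with ⟨⟨hb1, hb2⟩, hup, hat⟩
    by_cases hq : q n = true
    · simp only [hq, if_true]
      refine ⟨⟨by omega, by push_cast; omega⟩, ?_, Or.inr ⟨by omega, by simp [hq]⟩⟩
      intro i hi _
      have : i ≤ n := by omega
      exact_mod_cast this
    · simp only [hq]
      refine ⟨⟨hb1, by push_cast at hb2 ⊢; omega⟩, ?_, hat⟩
      intro i hi hp
      rcases Nat.lt_or_ge i n with h | h
      · exact hup i h hp
      · have : i = n := by omega
        subst this
        exact absurd hp (by simp [hq])

theorem spec_unique {p : Nat → Bool} {n : Nat} {v w : Int}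
    (hv : LastSpec p n v) (hw : LastSpec p n w) : v = w := by
  rcases hv with ⟨⟨hv1, hv2⟩, hvu, hva⟩
  rcases hw with ⟨⟨hw1, hw2⟩, hwu, hwa⟩
  rcases hva with rfl | ⟨hv0, hvp⟩
  · rcases hwa with rfl | ⟨hw0, hwp⟩
    · rfl
    · have := hvu w.toNat (by omega) hwp
      omega
  · rcases hwa with rfl | ⟨hw0, hwp⟩
    · have := hwu v.toNat (by omega) hvp
      omega
    · have h1 := hvu w.toNat (by omega) hwp
      have h2 := hwu v.toNat (by omega) hvp
      omega

theorem spec_congr {p q : Nat → Bool} {n : Nat} {v : Int}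
    (h : ∀ i, i < n → p i = q i) (hp : LastSpec p n v) : LastSpec q n v := by
  rcases hp with ⟨⟨hb1, hb2⟩, hu, ha⟩
  refine ⟨⟨hb1, hb2⟩, fun i hi hq => hu i hi (by rw [h i hi]; exact hq), ?_⟩
  rcases ha with rfl | ⟨h0, hp'⟩
  · exact Or.inl rfl
  · exact Or.inr ⟨h0, by rw [← h _ (by omega)]; exact hp'⟩

theorem spec_or {p q : Nat → Bool} {n : Nat} {u v : Int}
    (hp : LastSpec p n u) (hq : LastSpec q n v) :
    LastSpec (fun i => p i || q i) n (max u v) := by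
  rcases hp with ⟨⟨hp1, hp2⟩, hpu, hpa⟩
  rcases hq with ⟨⟨hq1, hq2⟩, hqu, hqa⟩
  refine ⟨⟨by omega, by omega⟩, ?_, ?_⟩
  · intro i hi h
    rcases Bool.or_eq_true_iff.mp h with h' | h'
    · have := hpu i hi h'; omega
    · have := hqu i hi h'; omega
  · rcases le_total u v with hm | hm
    · rw [max_eq_right hm]
      rcases hqa with rfl | ⟨h0, hq'⟩
      · exact Or.inl rfl
      · exact Or.inr ⟨h0, by simp [hq']⟩
    · rw [max_eq_left hm]
      rcases hpa with rfl | ⟨h0, hp'⟩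
      · exact Or.inl rfl
      · exact Or.inr ⟨h0, by simp [hp']⟩

theorem enum_concat {α : Type} (xs : List α) (x : α) (s : Int) :
    PySem.List.enumerate (xs ++ [x]) s = PySem.List.enumerate xs s ++ [(s + xs.length, x)] := by
  induction xs generalizing s with
  | nil => simp [PySem.List.enumerate_nil, PySem.List.enumerate_cons]
  | cons a t ih =>
    simp only [List.cons_append, PySem.List.enumerate_cons, ih, List.length_cons]
    have : s + 1 + (t.length : Int) = s + ((t.length : Nat) + 1 : Nat) := by push_cast; ring
    rw [this]

theorem lastMatch_nil {α : Type} (p : α → Bool) : lastMatch p [] = -1 := rfl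

theorem lastMatch_concat {α : Type} (p : α → Bool) (xs : List α) (x : α) :
    lastMatch p (xs ++ [x]) = if p x then (xs.length : Int) else lastMatch p xs := by
  unfold lastMatch
  rw [enum_concat, List.foldl_append]
  simp

theorem specLast {α : Type} (p : α → Bool) (d : α) (xs : List α) (n : Nat) :
    xs.length ≤ n →
    LastSpec (fun i => decide (i < xs.length) && p (xs.getD i d)) n (lastMatch p xs) := by
  induction xs using List.reverseRecOn with
  | nil =>
    intro _
    rw [lastMatch_nil]
    refine ⟨⟨le_refl _, by omega⟩, ?_, Or.inl rfl⟩
    intro i _ h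
    simp at h
  | append_singleton xs x ih =>
    intro hn
    have hlen1 : (xs ++ [x]).length = xs.length + 1 := by simp
    have hlen : xs.length ≤ n := by omega
    rw [lastMatch_concat]
    by_cases hx : p x = true
    · simp only [hx, if_true]
      refine ⟨⟨by omega, by omega⟩, ?_, Or.inr ⟨by omega, ?_⟩⟩
      · intro i hi hp'
        have h1 : i < (xs ++ [x]).length := of_decide_eq_true (Bool.and_eq_true_iff.mp hp').1
        rw [hlen1] at h1
        have : i ≤ xs.length := by omega
        exact_mod_cast this
      · have h1 : ((xs.length : Int)).toNat = xs.length := by omega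
        rw [h1]
        refine Bool.and_eq_true_iff.mpr ⟨by simp, ?_⟩
        rw [List.getD_eq_getElem _ _ (by simp), List.getElem_concat_length rfl]
        exact hx
    · have hx' : p x = false := by simpa using hx
      simp only [hx', Bool.false_eq_true, if_false]
      obtain ⟨⟨hb1, hb2⟩, hu, ha⟩ := ih hlen
      refine ⟨⟨hb1, hb2⟩, ?_, ?_⟩
      · intro i hi hp'
        obtain ⟨hd, hpe⟩ := Bool.and_eq_true_iff.mp hp'
        have hi1 : i < xs.length + 1 := by
          have := of_decide_eq_true hd
          rw [hlen1] at this
          omega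
        rcases Nat.lt_or_ge i xs.length with hil | hil
        · apply hu i hi
          refine Bool.and_eq_true_iff.mpr ⟨by simpa using hil, ?_⟩
          rw [List.getD_append _ _ _ _ hil] at hpe
          exact hpe
        · have : i = xs.length := by omega
          subst this
          rw [List.getD_eq_getElem _ _ (by simp), List.getElem_concat_length rfl] at hpe
          rw [hpe] at hx'
          exact absurd hx' (by simp)
      · rcases ha with h | ⟨h0, hp'⟩
        · exact Or.inl h
        · obtain ⟨hd, hpe⟩ := Bool.and_eq_true_iff.mp hp'
          have hvl : (lastMatch p xs).toNat < xs.length := of_decide_eq_true hd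
          refine Or.inr ⟨h0, Bool.and_eq_true_iff.mpr ⟨by simp; omega, ?_⟩⟩
          rw [List.getD_append _ _ _ _ hvl]
          exact hpe

theorem foldl_max_init {α : Type} (g : α → Int) (t : List α) (a b : Int) :
    t.foldl (fun w r => max w (g r)) (max a b) = max a (t.foldl (fun w r => max w (g r)) b) := by
  induction t generalizing b with
  | nil => simp
  | cons x t ih =>
    simp only [List.foldl_cons]
    rw [max_assoc, ih]

theorem specFold (rs : List (List String)) (n : Nat) :
    (∀ r ∈ rs, r.length ≤ n) →
    LastSpec (QB rs) n (rs.foldl (fun w r => max w (1 + lastMatch cellNe r)) 0 - 1) := by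
  induction rs with
  | nil =>
    intro _
    simp only [List.foldl_nil]
    refine ⟨⟨by norm_num, by omega⟩, ?_, Or.inl (by norm_num)⟩
    intro i _ h
    simp [QB] at h
  | cons r t ih =>
    intro h
    have h1 : (r :: t).foldl (fun w r => max w (1 + lastMatch cellNe r)) 0
        = max (1 + lastMatch cellNe r) (t.foldl (fun w r => max w (1 + lastMatch cellNe r)) 0) := by
      simp only [List.foldl_cons]
      rw [max_comm (0 : Int) (1 + lastMatch cellNe r), foldl_max_init]
    rw [h1]
    have hmax : max (1 + lastMatch cellNe r) (t.foldl (fun w r => max w (1 + lastMatch cellNe r)) 0) - 1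
        = max (lastMatch cellNe r) (t.foldl (fun w r => max w (1 + lastMatch cellNe r)) 0 - 1) := by
      rcases le_total (1 + lastMatch cellNe r) (t.foldl (fun w r => max w (1 + lastMatch cellNe r)) 0) with h' | h'
      · rw [max_eq_right h', max_eq_right (by omega)]
      · rw [max_eq_left h', max_eq_left (by omega)]
        omega
    rw [hmax]
    have hcl := specLast cellNe "" r n (h r (by simp))
    have hih := ih (fun r hr => h r (by simp [hr]))
    refine spec_congr (fun i _ => ?_) (spec_or hcl hih)
    simp [QB, List.any_cons]

theorem padTo_length (W : Int) (r : List String) (h0 : 0 ≤ W) (h : (r.length : Int) ≤ W) :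
    (padTo W r).length = W.toNat := by
  unfold padTo
  split_ifs with hl
  · simp only [List.length_append, List.length_replicate]
    omega
  · omega

theorem padTo_cell (W : Int) (r : List String) (col : Nat) (h : (r.length : Int) ≤ W) :
    cellNe ((padTo W r).getD col "") = (decide (col < r.length) && cellNe (r.getD col "")) := by
  unfold padTo
  split_ifs with hl
  · by_cases hc : col < r.length
    · rw [List.getD_append _ _ _ _ hc]
      simp [hc]
    · rw [List.getD_append_right _ _ _ _ (by omega)]
      simp [hc, cellNe_empty]
  · by_cases hc : col < r.length
    · simp [hc]
    · rw [List.getD_eq_default _ _ (by omega)]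
      simp [hc, cellNe_empty]

theorem any_congr_mem {α : Type} (l : List α) (p q : α → Bool)
    (h : ∀ x ∈ l, p x = q x) : l.any p = l.any q := by
  induction l with
  | nil => rfl
  | cons a t ih =>
    simp only [List.any_cons, h a (by simp), ih (fun x hx => h x (by simp [hx]))]

theorem colEq (Wi : Int) (s : List (List String)) (hle : ∀ r ∈ s, (r.length : Int) ≤ Wi)
    (h0 : 0 ≤ Wi) (col : Nat) (hcol : col < Wi.toNat) :
    qCol s Wi col = QB s col := by
  unfold qCol
  rw [List.any_map]
  unfold QB
  apply any_congr_mem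
  intro r hr
  have hplen : (padTo Wi r).length = Wi.toNat := padTo_length Wi r h0 (hle r hr)
  simp only [Function.comp_apply]
  rw [if_pos (by omega)]
  exact padTo_cell Wi r col (hle r hr)

theorem foldA (m : List (List String)) (acc : List (List String)) (a : Int) :
    m.foldl (fun (acc : List (List String) × Int) row =>
      (acc.1 ++ [row.map sanitize_table_cell], max acc.2 ((row.map sanitize_table_cell).length : Int))) (acc, a)
    = (acc ++ m.map (fun r => r.map sanitize_table_cell),
       m.foldl (fun x r => max x ((r.map sanitize_table_cell).length : Int)) a) := by
  induction m generalizing acc a with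
  | nil => simp
  | cons r t ih =>
    rw [List.foldl_cons, ih]
    simp

theorem all_not_eq (row : List String) : (row.all fun c => !cellNe c) = !rowNe row := by
  rw [List.all_eq_not_any_not]
  simp [rowNe]

theorem popLemma (l : List (List String)) :
    popTrailing l = if lastMatch rowNe l = -1 then [] else l.take ((lastMatch rowNe l).toNat + 1) := by
  induction l using List.reverseRecOn with
  | nil =>
    rw [popTrailing]
    simp [lastMatch_nil]
  | append_singleton xs x ih =>
    by_cases hx : rowNe x = true
    · have hc : ¬((xs ++ [x]) ≠ [] ∧ (((xs ++ [x]).getLast?.getD []).all fun c => !cellNe c) = true) := by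
        rintro ⟨-, hB⟩
        rw [List.getLast?_concat, Option.getD_some, all_not_eq, hx] at hB
        simp at hB
      rw [popTrailing, dif_neg hc, lastMatch_concat, if_pos hx, if_neg (by omega)]
      have h1 : ((xs.length : Int)).toNat + 1 = xs.length + 1 := by omega
      rw [h1, List.take_of_length_le (by simp)]
    · have hx' : rowNe x = false := by simpa using hx
      have hc : ((xs ++ [x]) ≠ [] ∧ (((xs ++ [x]).getLast?.getD []).all fun c => !cellNe c) = true) := by
        refine ⟨by simp, ?_⟩
        rw [List.getLast?_concat, Option.getD_some, all_not_eq, hx']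
        rfl
      rw [popTrailing, dif_pos hc, List.dropLast_concat, lastMatch_concat,
          if_neg (show ¬(rowNe x = true) from by simp [hx']), ih]
      by_cases h1 : lastMatch rowNe xs = -1
      · simp [h1]
      · rw [if_neg h1, if_neg h1]
        obtain ⟨⟨hb1, hb2⟩, _, ha⟩ := specLast rowNe [] xs xs.length (le_refl _)
        have h0 : 0 ≤ lastMatch rowNe xs := by
          rcases ha with h | ⟨h0, _⟩
          · exact absurd h h1
          · exact h0
        rw [List.take_append_of_le_length (by omega)]

theorem rowEq (Wi : Int) (k : Nat) (r : List String)
    (hr : (r.length : Int) ≤ Wi) (hk : k ≤ Wi.toNat) :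
    (padTo Wi r).take k = (r ++ List.replicate k "").take k := by
  unfold padTo
  split_ifs with hl
  · rw [List.take_append, List.take_append, List.take_replicate, List.take_replicate]
    have : min (k - r.length) (Wi - (r.length : Int)).toNat = min (k - r.length) k := by omega
    rw [this]
  · rw [List.take_append, List.take_replicate]
    have : k - r.length = 0 := by omega
    simp [this]

theorem main_eq (matrix : List (List String)) :
    normalize_table_matrix matrix = normalize_table_matrix_alt matrix := by
  by_cases hm : matrix = []
  · subst hm; rfl
  · simp only [normalize_table_matrix, normalize_table_matrix_alt, if_neg hm]
    rw [foldA]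
    simp only [List.nil_append]
    have hmax := PySem.List.le_foldl_max (matrix.map (fun r => ((r.map sanitize_table_cell).length : Int))) 0
    rw [List.foldl_map] at hmax
    set s := matrix.map (fun r => r.map sanitize_table_cell) with hs
    set Wi := matrix.foldl (fun x r => max x ((r.map sanitize_table_cell).length : Int)) 0 with hWi
    have h0W : 0 ≤ Wi := hmax.1
    have hle : ∀ r ∈ s, (r.length : Int) ≤ Wi := by
      intro r hrm
      obtain ⟨r0, hr0, rfl⟩ := List.mem_map.mp hrm
      have h := hmax.2 _ (List.mem_map_of_mem hr0)
      simpa using h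
    have hFmax := PySem.List.le_foldl_max (s.map (fun r => 1 + lastMatch cellNe r)) 0
    rw [List.foldl_map] at hFmax
    set F := s.foldl (fun w row => max w (1 + lastMatch cellNe row)) 0 with hF
    have hF0 : 0 ≤ F := hFmax.1
    by_cases hW0 : Wi = 0
    · -- every sanitized row is empty: both return []
      have hFc := specFold s 0 (fun r hr => by have := hle r hr; omega)
      have hFz : F = 0 := by
        obtain ⟨⟨_, hb2⟩, _, _⟩ := hFc
        omega
      simp [hW0, hFz]
    · have hWpos : 0 < Wi := by omega
      have hsne : s ≠ [] := by
        simpa [hs, List.map_eq_nil_iff] using hm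
      have hlen : ∀ r ∈ s, r.length ≤ Wi.toNat := fun r hr => by have := hle r hr; omega
      simp only [if_neg hW0]
      have hpadEq : s.map (fun row => if ((row.length : Int)) < Wi then row ++ List.replicate (Wi - (row.length : Int)).toNat "" else row) = s.map (padTo Wi) := by
        simp [padTo]
      rw [hpadEq]
      have hpne' : s.map (padTo Wi) ≠ [] := by
        simpa [List.map_eq_nil_iff] using hsne
      simp only [trim_trailing_empty_columns]
      rw [if_neg hpne']
      obtain ⟨h0, t0, hst⟩ := List.exists_cons_of_ne_nil hsne
      have hcc : ((s.map (padTo Wi)).getD 0 []).length = Wi.toNat := by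
        rw [hst]
        simp only [List.map_cons, List.getD_cons_zero]
        exact padTo_length Wi h0 h0W (hle h0 (by rw [hst]; simp))
      rw [hcc]
      have hALform : (List.range Wi.toNat).foldl (fun acc col =>
          if ((s.map (padTo Wi)).any fun row => cellNe (if col < row.length then row.getD col "" else "")) = true
          then (col : Int) else acc) (-1)
        = AL (qCol s Wi) Wi.toNat := rfl
      rw [hALform]
      have hchA : LastSpec (QB s) Wi.toNat (AL (qCol s Wi) Wi.toNat) :=
        spec_congr (fun i hi => colEq Wi s hle h0W i hi) (specA (qCol s Wi) Wi.toNat)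
      have hchF : LastSpec (QB s) Wi.toNat (F - 1) := specFold s Wi.toNat hlen
      have hALF : AL (qCol s Wi) Wi.toNat = F - 1 := spec_unique hchA hchF
      by_cases h1 : AL (qCol s Wi) Wi.toNat = -1
      · -- no non-empty cell anywhere: both return []
        have hFz : F = 0 := by omega
        rw [if_pos h1, popTrailing]
        simp [hFz]
      · have hln0 : 0 ≤ AL (qCol s Wi) Wi.toNat := by
          rcases hchA.2.2 with h | ⟨h0', _⟩
          · exact absurd h h1
          · exact h0'
        have hFpos : F = AL (qCol s Wi) Wi.toNat + 1 := by omega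
        rw [if_neg h1, if_neg (by omega : ¬ F = 0)]
        have hTA : (s.map (padTo Wi)).map (fun row =>
            if ((PySem.List.slice row none (some (AL (qCol s Wi) Wi.toNat + 1))).length : Int) < AL (qCol s Wi) Wi.toNat + 1 then
              PySem.List.slice row none (some (AL (qCol s Wi) Wi.toNat + 1)) ++
                List.replicate (AL (qCol s Wi) Wi.toNat + 1 - ((PySem.List.slice row none (some (AL (qCol s Wi) Wi.toNat + 1))).length : Int)).toNat ""
            else PySem.List.slice row none (some (AL (qCol s Wi) Wi.toNat + 1)))
            = s.map (fun row => PySem.List.slice (row ++ List.replicate F.toNat "") none (some F)) := by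
          rw [List.map_map]
          apply List.map_congr_left
          intro r hr
          have hrW := hle r hr
          have hplen : (padTo Wi r).length = Wi.toNat := padTo_length Wi r h0W hrW
          have hkW : (AL (qCol s Wi) Wi.toNat + 1).toNat ≤ Wi.toNat := by
            have := hchA.1.2
            omega
          simp only [Function.comp_apply]
          rw [PySem.List.slice_to _ (by omega), PySem.List.slice_to _ (by omega)]
          have htl : (List.take (AL (qCol s Wi) Wi.toNat + 1).toNat (padTo Wi r)).length
              = (AL (qCol s Wi) Wi.toNat + 1).toNat := by
            simp [hplen]
            omega
          rw [if_neg (by rw [htl]; omega)]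
          have hFk : F.toNat = (AL (qCol s Wi) Wi.toNat + 1).toNat := by omega
          rw [hFk]
          exact rowEq Wi _ r hrW hkW
        rw [hTA]
        set T := s.map (fun row => PySem.List.slice (row ++ List.replicate F.toNat "") none (some F)) with hT
        simp only [show (fun (row : List String) => row.any cellNe) = rowNe from rfl]
        have hlast0 : 0 ≤ lastMatch rowNe T := by
          have hQ : QB s (AL (qCol s Wi) Wi.toNat).toNat = true := by
            rcases hchA.2.2 with h | ⟨_, hp⟩
            · exact absurd h h1
            · exact hp
          obtain ⟨r, hrs, hrp⟩ := List.any_eq_true.mp hQ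
          obtain ⟨hd, hne⟩ := Bool.and_eq_true_iff.mp hrp
          have hcl : (AL (qCol s Wi) Wi.toNat).toNat < r.length := of_decide_eq_true hd
          set o := List.take F.toNat (r ++ List.replicate F.toNat "") with ho
          have hoT : o ∈ T := by
            rw [hT]
            refine List.mem_map.mpr ⟨r, hrs, ?_⟩
            rw [PySem.List.slice_to _ (by omega)]
          have holen : o.length = F.toNat := by
            rw [ho]
            simp
          have hcF : (AL (qCol s Wi) Wi.toNat).toNat < F.toNat := by omega
          have hidx : (AL (qCol s Wi) Wi.toNat).toNat < o.length := by omega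
          have hoNe : rowNe o = true := by
            refine List.any_eq_true.mpr ⟨o[(AL (qCol s Wi) Wi.toNat).toNat]'hidx, List.getElem_mem hidx, ?_⟩
            have hoel : o[(AL (qCol s Wi) Wi.toNat).toNat]'hidx = r[(AL (qCol s Wi) Wi.toNat).toNat]'hcl := by
              simp only [ho, List.getElem_take]
              exact List.getElem_append_left hcl
            rw [hoel, ← List.getD_eq_getElem r "" hcl]
            exact hne
          obtain ⟨_, hu, _⟩ := specLast rowNe [] T T.length (le_refl _)
          obtain ⟨j, hj, hTj⟩ := List.mem_iff_getElem.mp hoT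
          have := hu j hj (Bool.and_eq_true_iff.mpr ⟨by simpa using hj,
            by rw [List.getD_eq_getElem _ _ hj, hTj]; exact hoNe⟩)
          omega
        rw [popLemma, if_neg (by omega : ¬ lastMatch rowNe T = -1)]
        rw [PySem.List.slice_to _ (by omega)]
        have h2 : (lastMatch rowNe T + 1).toNat = (lastMatch rowNe T).toNat + 1 := by omega
        rw [h2]
        have hTne : T ≠ [] := by
          simpa [hT, List.map_eq_nil_iff] using hsne
        rw [if_neg (by simp [List.take_eq_nil_iff, hTne])]

-- ===== VERDICT (by name: the statement is the Claim_ definition above) =====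
theorem normalize_table_matrix_spec : Claim_equal_normalize_table_matrix := by
  intro matrix _
  show normalize_table_matrix matrix = normalize_table_matrix_alt matrix
  exact main_eq matrix
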